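-- pv_equiv track=rewrite | github.com/shimulhawladar/python3 | bill_calculator.py | summarize_bill_counts
-- ===== SOURCE A (Python) =====
-- def calculate_bill_counts(target_amount, available_denominations):
--     """Calculates the number of bills needed for a given target amount with available denominations.
--
--     Args:
--         target_amount (int): The target amount of money.
--         available_denominations (list[int]): A list of available denominations.
--
--     Returns:
--         dict: A dictionary containing the number of bills for each denomination.
--     """
--
--     individual_bill_counts = {}
--     for denomination in available_denominations:
--         if target_amount >= denomination:
--             individual_bill_counts[denomination] = target_amount // denomination
--             target_amount %= denomination
--     return individual_bill_counts
--
-- def summarize_bill_counts(requested_amounts, available_denominations):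
--     """Calculates the total bill counts for multiple requested amounts.
--
--     Args:
--         requested_amounts (list[int]): A list of requested amounts.
--         available_denominations (list[int]): A list of available denominations.
--
--     Returns:
--         list: A list containing three strings summarizing the results.
--     """
--
--     individual_calculations = [calculate_bill_counts(amount, available_denominations) for amount in requested_amounts]
--     total_bill_counts = {}
--
--     for calculation in individual_calculations:
--         for denomination, count in calculation.items():
--             if denomination in total_bill_counts:
--                 total_bill_counts[denomination] += count
--             else:
--                 total_bill_counts[denomination] = count
--
--     requested_text = f"Requested bill amounts: {requested_amounts}"
--     total_amount_text = f"Total requested amount: {sum(requested_amounts)}"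
--
--     def format_bill_count(key, value):
--         return f"${key}: {value}"
--
--     result_text = " | ".join(format_bill_count(key, value) for key, value in sorted(total_bill_counts.items()))
--
--     return [requested_text, total_amount_text, result_text]
-- ===== SOURCE B (Python) =====
-- def summarize_bill_counts(requested_amounts, available_denominations):
--     """Transposed sweep: denominations outer, amounts inner, over a shared
--     remainders list and one running totals dict (no per-amount dicts)."""
--     remainders = list(requested_amounts)
--     total_counts = {}
--     for denomination in available_denominations:
--         fired = False
--         subtotal = 0
--         new_remainders = []
--         for r in remainders:
--             if r >= denomination:
--                 fired = True
--                 subtotal += r // denomination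
--                 new_remainders.append(r % denomination)
--             else:
--                 new_remainders.append(r)
--         if fired:
--             total_counts[denomination] = subtotal
--         remainders = new_remainders
--     requested_text = f"Requested bill amounts: [{', '.join(str(a) for a in requested_amounts)}]"
--     total_amount_text = f"Total requested amount: {sum(requested_amounts)}"
--     result_text = " | ".join(f"${k}: {v}" for k, v in sorted(total_counts.items()))
--     return [requested_text, total_amount_text, result_text]
-- ===== Notes on version B (the rewrite author's own statement) =====
-- stated objective: alternative
-- what changed: Replaces A's per-amount greedy dicts plus a second aggregation pass by a single transposed sweep: denominations outer, amounts inner, over a shared remainders list, writing each denomination's batch subtotal into one totals dict.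
import Mathlib
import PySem

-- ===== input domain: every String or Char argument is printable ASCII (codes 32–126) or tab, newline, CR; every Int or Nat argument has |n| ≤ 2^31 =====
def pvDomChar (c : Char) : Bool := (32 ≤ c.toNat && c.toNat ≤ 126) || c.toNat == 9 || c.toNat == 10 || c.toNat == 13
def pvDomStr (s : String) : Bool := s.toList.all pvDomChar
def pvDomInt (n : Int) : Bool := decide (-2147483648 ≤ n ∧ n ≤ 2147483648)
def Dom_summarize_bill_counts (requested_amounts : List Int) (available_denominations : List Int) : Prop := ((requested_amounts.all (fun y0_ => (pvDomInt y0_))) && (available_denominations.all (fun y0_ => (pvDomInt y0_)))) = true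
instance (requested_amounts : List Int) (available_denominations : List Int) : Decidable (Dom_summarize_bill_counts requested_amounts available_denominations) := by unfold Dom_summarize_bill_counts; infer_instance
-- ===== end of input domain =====

-- B replaces A's per-amount greedy dicts plus a second aggregation pass by one transposed
-- sweep (denominations outer, amounts inner, over a shared remainders list and one totals
-- dict); objective: alternative (same cost, a genuinely different traversal structure).

-- ===== PORT A =====
-- helper of A: greedy bill counts for one amount (a dict, insertion-ordered)
def calculate_bill_counts (target_amount : Int) (available_denominations : List Int) : PySem.Dict Int Int :=
  (available_denominations.foldl
    (fun (s : Int × PySem.Dict Int Int) denomination =>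
      if s.1 ≥ denomination then
        (PySem.Int.mod s.1 denomination,
         s.2.insert denomination (PySem.Int.floordiv s.1 denomination))
      else s)
    (target_amount, PySem.Dict.empty)).2

-- A's nested helper format_bill_count
def pvFormatBillCount (key value : Int) : String :=
  "$" ++ PySem.Int.toStr key ++ ": " ++ PySem.Int.toStr value

def summarize_bill_counts (requested_amounts : List Int) (available_denominations : List Int) : List String :=
  let individual_calculations :=
    requested_amounts.map (fun amount => calculate_bill_counts amount available_denominations)
  let total_bill_counts :=
    individual_calculations.foldl
      (fun total calculation =>
        calculation.items.foldl
          (fun total p =>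
            if total.contains p.1 then total.modify p.1 0 (· + p.2) else total.insert p.1 p.2)
          total)
      PySem.Dict.empty
  -- f"{requested_amounts}" is Python's list repr: '[' ++ ', '-joined str(n) ++ ']'
  let requested_text :=
    "Requested bill amounts: [" ++ PySem.Str.join ", " (requested_amounts.map PySem.Int.toStr) ++ "]"
  let total_amount_text := "Total requested amount: " ++ PySem.Int.toStr requested_amounts.sum
  -- dict keys are distinct, so Python's tuple sort of items() is the stable sort by key: exact here
  let result_text :=
    PySem.Str.join " | "
      ((PySem.List.sorted total_bill_counts.items (fun p => p.1) false).map
        (fun p => pvFormatBillCount p.1 p.2))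
  [requested_text, total_amount_text, result_text]

-- ===== PORT B =====
def summarize_bill_counts_alt (requested_amounts : List Int) (available_denominations : List Int) : List String :=
  -- transposed sweep: state = (remainders, total_counts);
  -- inner loop rebuilds the remainders and accumulates (fired, subtotal)
  let st :=
    available_denominations.foldl
      (fun (s : List Int × PySem.Dict Int Int) denomination =>
        let inner :=
          s.1.foldl
            (fun (q : List Int × Bool × Int) r =>
              if r ≥ denomination then
                (q.1 ++ [PySem.Int.mod r denomination], true,
                 q.2.2 + PySem.Int.floordiv r denomination)
              else (q.1 ++ [r], q.2.1, q.2.2))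
            ([], false, 0)
        (inner.1, if inner.2.1 then s.2.insert denomination inner.2.2 else s.2))
      (requested_amounts, PySem.Dict.empty)
  let total_counts := st.2
  let requested_text :=
    "Requested bill amounts: [" ++ PySem.Str.join ", " (requested_amounts.map PySem.Int.toStr) ++ "]"
  let total_amount_text := "Total requested amount: " ++ PySem.Int.toStr requested_amounts.sum
  -- dict keys are distinct, so Python's tuple sort of items() is the stable sort by key: exact here
  let result_text :=
    PySem.Str.join " | "
      ((PySem.List.sorted total_counts.items (fun p => p.1) false).map
        (fun p => "$" ++ PySem.Int.toStr p.1 ++ ": " ++ PySem.Int.toStr p.2))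
  [requested_text, total_amount_text, result_text]

-- ===== PRECONDITION & SPEC =====
-- Pre_ excludes denomination lists containing 0: on them A can raise ZeroDivisionError
-- (it returns only if every running remainder is negative when 0 is reached).
def Pre_summarize_bill_counts (requested_amounts : List Int) (available_denominations : List Int) : Prop :=
  (0 : Int) ∉ available_denominations
instance (requested_amounts : List Int) (available_denominations : List Int) : Decidable (Pre_summarize_bill_counts requested_amounts available_denominations) := by unfold Pre_summarize_bill_counts; infer_instance

def pvWitness_summarize_bill_counts : List Int × List Int := ([21, 8], [10, 5, 1])

def Spec_summarize_bill_counts (requested_amounts : List Int) (available_denominations : List Int) (out : List String) : Prop := out = summarize_bill_counts_alt requested_amounts available_denominations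
instance (requested_amounts : List Int) (available_denominations : List Int) (out : List String) : Decidable (Spec_summarize_bill_counts requested_amounts available_denominations out) := by unfold Spec_summarize_bill_counts; infer_instance

-- ===== CLAIM (what is proved, stated in full; the proofs are below) =====
def Claim_equal_summarize_bill_counts : Prop := ∀ (requested_amounts : List Int) (available_denominations : List Int), Dom_summarize_bill_counts requested_amounts available_denominations → Pre_summarize_bill_counts requested_amounts available_denominations → Spec_summarize_bill_counts requested_amounts available_denominations (summarize_bill_counts requested_amounts available_denominations)

-- ===== LEMMAS AND PROOFS =====

-- one greedy step of a remainder
def pvStep (d t : Int) : Int := if t ≥ d then PySem.Int.mod t d else t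

-- first-some choice on options (Python's "a later assignment wins" reversed into recursion)
def pvOr (a b : Option Int) : Option Int := match a with | some v => some v | none => b

-- value stored for key k in A's per-amount greedy dict (the LAST firing occurrence wins)
def pvVal : Int → List Int → Int → Option Int
  | _, [], _ => none
  | t, d :: ds, k =>
      pvOr (pvVal (pvStep d t) ds k)
        (if t ≥ d ∧ k = d then some (PySem.Int.floordiv t d) else none)

def pvFire (d : Int) (rs : List Int) : Bool := rs.any (fun r => decide (r ≥ d))

def pvSubtotal (d : Int) (rs : List Int) : Int :=
  ((rs.filter (fun r => decide (r ≥ d))).map (fun r => PySem.Int.floordiv r d)).sum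

-- value stored for key k in B's totals dict (the last assignment wins)
def pvBVal : List Int → List Int → Int → Option Int
  | _, [], _ => none
  | rs, d :: ds, k =>
      pvOr (pvBVal (rs.map (pvStep d)) ds k)
        (if k = d ∧ pvFire d rs then some (pvSubtotal d rs) else none)

-- the counter step of A's aggregation loop, and its fold
def pvCStep (t : PySem.Dict Int Int) (p : Int × Int) : PySem.Dict Int Int :=
  t.insert p.1 (t.getD p.1 0 + p.2)

def pvCFold (l : List (Int × Int)) (t : PySem.Dict Int Int) : PySem.Dict Int Int :=
  l.foldl pvCStep t

lemma pvOr_some (v : Int) (b : Option Int) : pvOr (some v) b = some v := rfl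
lemma pvOr_none (b : Option Int) : pvOr none b = b := rfl
lemma pvOr_eq_none_iff (a b : Option Int) : pvOr a b = none ↔ a = none ∧ b = none := by
  cases a <;> simp [pvOr]

-- ---- A's per-amount dict, characterised by get? ----

lemma pvCalcFold_get? (ds : List Int) : ∀ (t : Int) (d0 : PySem.Dict Int Int) (k : Int),
    ((ds.foldl
        (fun (s : Int × PySem.Dict Int Int) d =>
          if s.1 ≥ d then (PySem.Int.mod s.1 d, s.2.insert d (PySem.Int.floordiv s.1 d)) else s)
        (t, d0)).2).get? k
      = pvOr (pvVal t ds k) (d0.get? k) := by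
  induction ds with
  | nil => intro t d0 k; simp [pvVal, pvOr]
  | cons d ds ih =>
    intro t d0 k
    by_cases h : t ≥ d
    · have hs : pvStep d t = PySem.Int.mod t d := if_pos h
      rw [List.foldl_cons, if_pos h, ih, pvVal, hs]
      rcases hv : pvVal (PySem.Int.mod t d) ds k with _ | v
      · rw [pvOr_none, pvOr_none, PySem.Dict.get?_insert]
        by_cases hk : k = d
        · rw [if_pos hk, if_pos ⟨h, hk⟩, pvOr_some]
        · rw [if_neg hk, if_neg (fun hx => hk hx.2), pvOr_none]
      · rw [pvOr_some, pvOr_some, pvOr_some]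
    · have hs : pvStep d t = t := if_neg h
      rw [List.foldl_cons, if_neg h, ih, pvVal, hs]
      rcases hv : pvVal t ds k with _ | v
      · rw [pvOr_none, pvOr_none, if_neg (fun hx => h hx.1), pvOr_none]
      · rw [pvOr_some, pvOr_some, pvOr_some]

lemma pvCalc_get? (a : Int) (ds : List Int) (k : Int) :
    (calculate_bill_counts a ds).get? k = pvVal a ds k := by
  unfold calculate_bill_counts
  rw [pvCalcFold_get?]
  cases hv : pvVal a ds k <;> simp [pvOr, PySem.Dict.get?_empty]

lemma pvCalc_keys_nodup (a : Int) (ds : List Int) :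
    (calculate_bill_counts a ds).keys.Nodup := by
  unfold calculate_bill_counts
  suffices h : ∀ (t : Int) (d0 : PySem.Dict Int Int), d0.keys.Nodup →
      ((ds.foldl
        (fun (s : Int × PySem.Dict Int Int) d =>
          if s.1 ≥ d then (PySem.Int.mod s.1 d, s.2.insert d (PySem.Int.floordiv s.1 d)) else s)
        (t, d0)).2).keys.Nodup by
    exact h a PySem.Dict.empty (by simp)
  induction ds with
  | nil => intro t d0 h0; exact h0
  | cons d ds ih =>
    intro t d0 h0
    by_cases h : t ≥ d
    · rw [List.foldl_cons, if_pos h]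
      exact ih _ _ (PySem.Dict.nodup_keys_insert _ _ _ h0)
    · rw [List.foldl_cons, if_neg h]
      exact ih _ _ h0

-- ---- invariants of the greedy remainder ----

-- t % e = t for e < t ≤ 0 with e < 0
lemma pvMod_self (e t : Int) (he : e < 0) (h1 : e < t) (h2 : t ≤ 0) : PySem.Int.mod t e = t := by
  have hq := PySem.Int.floordiv_mul_add_mod t e
  have hb := PySem.Int.mod_neg_bounds (a := t) he
  rcases lt_trichotomy (PySem.Int.floordiv t e) 0 with hf | hf | hf
  · nlinarith [hq, hb.1, hb.2]
  · rw [hf, zero_mul, zero_add] at hq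
    exact hq
  · nlinarith [hq, hb.1, hb.2]

-- a remainder below a positive denomination d stays below it
lemma pvStep_lt (d e t : Int) (he : e ≠ 0) (hd : 0 < d) (h : t < d) : pvStep e t < d := by
  unfold pvStep
  by_cases hf : t ≥ e
  · rw [if_pos hf]
    rcases lt_trichotomy e 0 with h1 | h1 | h1
    · have := PySem.Int.mod_neg_bounds (a := t) h1
      omega
    · exact absurd h1 he
    · have := PySem.Int.mod_lt (a := t) h1
      omega
  · rwa [if_neg hf]

-- once a remainder has fired on a negative denomination d it stays in (d, 0]
lemma pvStep_neg_inv (d e t : Int) (he : e ≠ 0) (h1 : d < t) (h2 : t ≤ 0) :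
    d < pvStep e t ∧ pvStep e t ≤ 0 := by
  unfold pvStep
  by_cases hf : t ≥ e
  · rw [if_pos hf]
    rcases lt_trichotomy e 0 with h3 | h3 | h3
    · rcases eq_or_lt_of_le hf with h4 | h4
      · have : PySem.Int.mod t e = 0 := by
          rw [PySem.Int.mod_eq_zero_iff_dvd]
          exact h4 ▸ dvd_refl e
        omega
      · rw [pvMod_self e t h3 h4 h2]
        exact ⟨h1, h2⟩
    · exact absurd h3 he
    · omega
  · rw [if_neg hf]
    exact ⟨h1, h2⟩

lemma pvVal_pos_none (d : Int) (hd : 0 < d) : ∀ (ds : List Int) (t : Int),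
    0 ∉ ds → t < d → pvVal t ds d = none := by
  intro ds
  induction ds with
  | nil => intro t _ _; rfl
  | cons e es ih =>
    intro t h0 ht
    have h0' : (0 : Int) ∉ es := fun h => h0 (List.mem_cons_of_mem _ h)
    have he0 : e ≠ 0 := fun h => h0 (by simp [h])
    rw [pvVal, ih _ h0' (pvStep_lt d e t he0 hd ht), pvOr_none]
    by_cases hf : t ≥ e ∧ d = e
    · exact absurd (hf.2 ▸ ht) (by omega)
    · rw [if_neg hf]

lemma pvVal_neg_isSome (d : Int) : ∀ (ds : List Int) (t : Int),
    0 ∉ ds → d < t → t ≤ 0 → d ∈ ds → (pvVal t ds d).isSome := by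
  intro ds
  induction ds with
  | nil => intro t _ _ _ h; cases h
  | cons e es ih =>
    intro t h0 h1 h2 hmem
    have h0' : (0 : Int) ∉ es := fun h => h0 (List.mem_cons_of_mem _ h)
    have he0 : e ≠ 0 := fun h => h0 (by simp [h])
    rw [pvVal]
    by_cases hde : d = e
    · subst hde
      rw [if_pos ⟨by omega, rfl⟩]
      cases pvVal (pvStep d t) es d <;> simp [pvOr]
    · have hmem' : d ∈ es := by
        rcases List.mem_cons.mp hmem with h | h
        · exact absurd h hde
        · exact h
      have hinv := pvStep_neg_inv d e t he0 h1 h2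
      have := ih (pvStep e t) h0' hinv.1 hinv.2 hmem'
      rcases Option.isSome_iff_exists.mp this with ⟨v, hv⟩
      simp [hv, pvOr]

lemma pvBVal_some_mem (ds : List Int) : ∀ (rs : List Int) (k v : Int),
    pvBVal rs ds k = some v → k ∈ ds := by
  induction ds with
  | nil => intro rs k v h; cases h
  | cons d ds ih =>
    intro rs k v h
    rw [pvBVal] at h
    rcases hl : pvBVal (rs.map (pvStep d)) ds k with _ | w
    · rw [hl, pvOr_none] at h
      by_cases hk : k = d ∧ pvFire d rs
      · exact hk.1 ▸ List.mem_cons_self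
      · rw [if_neg hk] at h; cases h
    · exact List.mem_cons_of_mem _ (ih _ _ _ hl)

-- E1: B's dict has key k iff some amount's per-amount dict has key k
lemma pvBVal_none_iff (ds : List Int) : ∀ (rs : List Int) (k : Int),
    pvBVal rs ds k = none ↔ ∀ t ∈ rs, pvVal t ds k = none := by
  induction ds with
  | nil => intro rs k; simp [pvBVal, pvVal]
  | cons d ds ih =>
    intro rs k
    rw [pvBVal, pvOr_eq_none_iff, ih]
    constructor
    · rintro ⟨hlater, hnow⟩ t ht
      rw [pvVal, pvOr_eq_none_iff]
      refine ⟨hlater _ (List.mem_map_of_mem ht), ?_⟩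
      by_cases hf : t ≥ d ∧ k = d
      · exfalso
        rw [if_pos ⟨hf.2, by simp [pvFire]; exact ⟨t, ht, hf.1⟩⟩] at hnow
        cases hnow
      · rw [if_neg hf]
    · intro h
      constructor
      · intro u hu
        rcases List.mem_map.mp hu with ⟨t, ht, rfl⟩
        have := h t ht
        rw [pvVal, pvOr_eq_none_iff] at this
        exact this.1
      · by_cases hf : k = d ∧ pvFire d rs
        · exfalso
          rcases List.any_eq_true.mp hf.2 with ⟨t, ht, htd⟩
          have := h t ht
          rw [pvVal, pvOr_eq_none_iff] at this
          have h2 := this.2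
          rw [if_pos ⟨by exact of_decide_eq_true htd, hf.1⟩] at h2
          cases h2
        · rw [if_neg hf]

lemma pvSum_filter_ite (d : Int) (rs : List Int) (f : Int → Int) :
    ((rs.filter (fun r => decide (r ≥ d))).map f).sum
      = (rs.map (fun r => if r ≥ d then f r else 0)).sum := by
  induction rs with
  | nil => rfl
  | cons r rs ih =>
    by_cases h : r ≥ d <;> simp [h, ih]

-- E2: when B's dict has key k, its value is the sum of the per-amount values
lemma pvBVal_some_val (ds : List Int) : ∀ (rs : List Int) (k v : Int), 0 ∉ ds →
    pvBVal rs ds k = some v → v = (rs.map (fun t => (pvVal t ds k).getD 0)).sum := by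
  induction ds with
  | nil => intro rs k v _ h; cases h
  | cons d ds ih =>
    intro rs k v h0 h
    have h0' : (0 : Int) ∉ ds := fun hm => h0 (List.mem_cons_of_mem _ hm)
    have hd0 : d ≠ 0 := fun hm => h0 (by simp [hm])
    rw [pvBVal] at h
    have hmap : ∀ g : Int → Int,
        ((rs.map (pvStep d)).map g).sum = (rs.map (fun t => g (pvStep d t))).sum := by
      intro g; rw [List.map_map]; rfl
    rcases hl : pvBVal (rs.map (pvStep d)) ds k with _ | w
    · -- no later assignment to k: B's value is this occurrence's subtotal
      rw [hl, pvOr_none] at h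
      by_cases hf : k = d ∧ pvFire d rs
      · rw [if_pos hf] at h
        injection h with hv
        have hnone : ∀ t ∈ rs, pvVal (pvStep d t) ds k = none := by
          intro t ht
          exact (pvBVal_none_iff ds (rs.map (pvStep d)) k).mp hl _ (List.mem_map_of_mem ht)
        subst hv
        rw [pvSubtotal, pvSum_filter_ite]
        congr 1
        refine List.map_congr_left ?_
        intro t ht
        rw [pvVal, hnone t ht, pvOr_none, hf.1]
        by_cases htd : t ≥ d
        · have hcond : t ≥ d ∧ d = d := ⟨htd, rfl⟩
          rw [if_pos hcond]
          simp
          exact fun hlt => absurd hlt (by omega)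
        · have hcond : ¬ (t ≥ d ∧ d = d) := fun hx => htd hx.1
          rw [if_neg hcond]
          simp
          exact fun hge => absurd hge (by omega)
      · rw [if_neg hf] at h; cases h
    · -- a later occurrence of k wins, and every amount firing now re-fires there
      rw [hl, pvOr_some] at h
      injection h with hv
      subst hv
      have hw := ih (rs.map (pvStep d)) k w h0' hl
      rw [hw, hmap]
      congr 1
      refine List.map_congr_left ?_
      intro t ht
      rw [pvVal]
      rcases hvt : pvVal (pvStep d t) ds k with _ | u
      · rw [pvOr_none]
        by_cases hf : t ≥ d ∧ k = d
        · -- t fires now but never later: impossible for k < 0, vacuous for k > 0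
          exfalso
          obtain ⟨htd, hkd⟩ := hf
          have hdk : d = k := hkd.symm
          subst hdk
          rcases lt_trichotomy d 0 with hdneg | hdz | hdpos
          · have hbnd := PySem.Int.mod_neg_bounds (a := t) hdneg
            have hmem : d ∈ ds := pvBVal_some_mem ds _ _ _ hl
            have := pvVal_neg_isSome d ds (pvStep d t) h0'
              (by rw [pvStep, if_pos htd]; omega) (by rw [pvStep, if_pos htd]; omega) hmem
            rw [hvt] at this; cases this
          · exact hd0 hdz
          · -- every mapped remainder is < d, so no later occurrence of d can fire
            have hall : ∀ u ∈ rs.map (pvStep d), pvVal u ds d = none := by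
              intro u hu
              rcases List.mem_map.mp hu with ⟨t', _, rfl⟩
              refine pvVal_pos_none d hdpos ds _ h0' ?_
              unfold pvStep
              by_cases ht' : t' ≥ d
              · rw [if_pos ht']
                exact PySem.Int.mod_lt (a := t') hdpos
              · rw [if_neg ht']; omega
            rw [(pvBVal_none_iff ds (rs.map (pvStep d)) d).mpr hall] at hl
            cases hl
        · rw [if_neg hf]
      · rw [pvOr_some]

-- ---- A's aggregation loop as a counter fold ----

lemma pvCFold_append (l₁ l₂ : List (Int × Int)) (t : PySem.Dict Int Int) :
    pvCFold (l₁ ++ l₂) t = pvCFold l₂ (pvCFold l₁ t) :=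
  List.foldl_append

lemma pvAstep_eq (t : PySem.Dict Int Int) (p : Int × Int) :
    (if t.contains p.1 then t.modify p.1 0 (· + p.2) else t.insert p.1 p.2) = pvCStep t p := by
  cases hc : t.contains p.1
  · have h0 : t.getD p.1 0 = 0 := PySem.Dict.getD_of_not_contains t 0 hc
    simp [pvCStep, h0]
  · simp [hc, pvCStep, PySem.Dict.modify, PySem.Dict.insert, PySem.Dict.getD]

lemma pvCFold_flat (g : Int → List (Int × Int)) (amts : List Int) : ∀ t : PySem.Dict Int Int,
    amts.foldl (fun t a => pvCFold (g a) t) t = pvCFold (amts.flatMap g) t := by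
  induction amts with
  | nil => intro t; simp [pvCFold]
  | cons a amts ih =>
    intro t
    rw [List.foldl_cons, List.flatMap_cons, pvCFold_append, ih]

lemma pvTotalA_eq (amts ds : List Int) :
    (amts.map (fun a => calculate_bill_counts a ds)).foldl
      (fun total c =>
        c.items.foldl
          (fun total p =>
            if total.contains p.1 then total.modify p.1 0 (· + p.2) else total.insert p.1 p.2)
          total)
      PySem.Dict.empty
    = pvCFold (amts.flatMap (fun a => (calculate_bill_counts a ds).items)) PySem.Dict.empty := by
  rw [List.foldl_map]
  refine Eq.trans ?_ (pvCFold_flat (fun a => (calculate_bill_counts a ds).items) amts PySem.Dict.empty)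
  apply PySem.List.foldl_congr_mem
  intro acc a _
  have hfn : (fun (total : PySem.Dict Int Int) (p : Int × Int) =>
      if total.contains p.1 then total.modify p.1 0 (· + p.2) else total.insert p.1 p.2)
      = pvCStep := funext fun t => funext fun p => pvAstep_eq t p
  rw [hfn]; rfl

lemma pvCFold_getD (l : List (Int × Int)) : ∀ (t : PySem.Dict Int Int) (k : Int),
    (pvCFold l t).getD k 0 =
      t.getD k 0 + ((l.filter (fun p => decide (p.1 = k))).map Prod.snd).sum := by
  induction l with
  | nil => intro t k; simp [pvCFold]
  | cons p l ih =>
    intro t k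
    have hc : pvCFold (p :: l) t = pvCFold l (pvCStep t p) := rfl
    rw [hc, ih]
    by_cases hk : p.1 = k
    · subst hk
      simp [pvCStep]
      ring
    · have hk2 : ¬ k = p.1 := fun h => hk h.symm
      simp [pvCStep, PySem.Dict.getD_insert, hk, hk2]

lemma pvCFold_keys (l : List (Int × Int)) :
    (pvCFold l PySem.Dict.empty).keys = PySem.Set.ofList (l.map Prod.fst) := by
  have h := PySem.Dict.keys_foldl_insert_key l (fun p => p.1)
    (fun d p => d.getD p.1 0 + p.2) PySem.Dict.empty
  simpa [pvCFold, pvCStep, PySem.Set.update] using h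

lemma pvCFold_keys_nodup (l : List (Int × Int)) :
    (pvCFold l PySem.Dict.empty).keys.Nodup := by
  have h := PySem.Dict.nodup_keys_foldl_insert_key l (fun p => p.1)
    (fun d p => d.getD p.1 0 + p.2) PySem.Dict.empty (by simp)
  simpa [pvCFold, pvCStep] using h

-- filter a nodup list by equality with one value
lemma pvFilter_eq_of_nodup (l : List Int) (k : Int) (h : l.Nodup) :
    l.filter (fun x => decide (x = k)) = if k ∈ l then [k] else [] := by
  induction l with
  | nil => simp
  | cons a l ih =>
    rcases List.nodup_cons.mp h with ⟨ha, hl⟩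
    by_cases hak : a = k
    · subst hak
      rw [List.filter_cons, if_pos (by simp), ih hl, if_neg ha]
      simp
    · rw [List.filter_cons, if_neg (by simpa using hak), ih hl]
      have hmem : (k ∈ a :: l) ↔ (k ∈ l) := by
        constructor
        · intro h2
          rcases List.mem_cons.mp h2 with h2 | h2
          · exact absurd h2.symm hak
          · exact h2
        · exact List.mem_cons_of_mem a
      rw [if_congr hmem rfl rfl]

lemma pvDict_filter_sum (dct : PySem.Dict Int Int) (k : Int) (h : dct.keys.Nodup) :
    ((dct.items.filter (fun p => decide (p.1 = k))).map Prod.snd).sum = (dct.get? k).getD 0 := by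
  rw [PySem.Dict.items_eq_map_keys dct h 0]
  rw [List.filter_map, List.map_map]
  have hcomp : ((fun (p : Int × Int) => decide (p.1 = k)) ∘ fun k' => (k', dct.getD k' 0))
      = fun x => decide (x = k) := rfl
  rw [hcomp, pvFilter_eq_of_nodup _ _ h]
  by_cases hm : k ∈ dct.keys
  · rw [if_pos hm]
    simp [PySem.Dict.getD_eq_get?_getD]
  · rw [if_neg hm]
    have hn : dct.get? k = none := by
      rw [PySem.Dict.get?_eq_none_iff_not_mem_keys]; exact hm
    simp [hn]

lemma pvFlatSum (g : Int → List (Int × Int)) (amts : List Int) (k : Int) :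
    (((amts.flatMap g).filter (fun p => decide (p.1 = k))).map Prod.snd).sum
      = (amts.map (fun a => (((g a).filter (fun p => decide (p.1 = k))).map Prod.snd).sum)).sum := by
  induction amts with
  | nil => rfl
  | cons a amts ih =>
    simp [List.flatMap_cons, List.filter_append, ih]

-- the totals dict A builds, characterised by get?
lemma pvTotalA_get? (amts ds : List Int) (k : Int) :
    (pvCFold (amts.flatMap (fun a => (calculate_bill_counts a ds).items)) PySem.Dict.empty).get? k
      = if (∀ t ∈ amts, pvVal t ds k = none) then none
        else some ((amts.map (fun t => (pvVal t ds k).getD 0)).sum) := by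
  have hmemkeys : k ∈ (pvCFold (amts.flatMap (fun a => (calculate_bill_counts a ds).items)) PySem.Dict.empty).keys
      ↔ ¬ (∀ t ∈ amts, pvVal t ds k = none) := by
    rw [pvCFold_keys, PySem.Set.mem_ofList]
    simp only [List.mem_map, List.mem_flatMap]
    constructor
    · rintro ⟨p, ⟨a, ha, hp⟩, rfl⟩ hall
      have hne2 : (calculate_bill_counts a ds).get? p.1 ≠ none := fun hn =>
        ((PySem.Dict.get?_eq_none_iff_not_mem_keys _ _).mp hn) (by
          simp only [PySem.Dict.keys, List.mem_map]
          exact ⟨p, hp, rfl⟩)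
      rw [pvCalc_get?] at hne2
      exact hne2 (hall a ha)
    · intro h
      rcases not_forall.mp h with ⟨a, ha⟩
      rcases Classical.not_imp.mp ha with ⟨hmem, hv⟩
      have hne2 : (calculate_bill_counts a ds).get? k ≠ none := by
        rw [pvCalc_get?]; exact hv
      have hkm : k ∈ (calculate_bill_counts a ds).keys := by
        by_contra hc
        exact hne2 ((PySem.Dict.get?_eq_none_iff_not_mem_keys _ _).mpr hc)
      simp only [PySem.Dict.keys, List.mem_map] at hkm
      rcases hkm with ⟨p, hp, hpk⟩
      exact ⟨p, ⟨a, hmem, hp⟩, hpk⟩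
  have hgd : (pvCFold (amts.flatMap (fun a => (calculate_bill_counts a ds).items)) PySem.Dict.empty).getD k 0
      = (amts.map (fun t => (pvVal t ds k).getD 0)).sum := by
    rw [pvCFold_getD, pvFlatSum]
    have := PySem.Dict.getD_empty (κ := Int) (ν := Int) k 0
    rw [this, zero_add]
    congr 1
    refine List.map_congr_left ?_
    intro a _
    rw [pvDict_filter_sum _ _ (pvCalc_keys_nodup a ds), pvCalc_get?]
  by_cases hall : ∀ t ∈ amts, pvVal t ds k = none
  · rw [if_pos hall]
    exact (PySem.Dict.get?_eq_none_iff_not_mem_keys _ _).mpr (fun hmem => (hmemkeys.mp hmem) hall)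
  · rw [if_neg hall]
    have hmem := hmemkeys.mpr hall
    have hne : (pvCFold (amts.flatMap (fun a => (calculate_bill_counts a ds).items)) PySem.Dict.empty).get? k ≠ none :=
      fun hn => ((PySem.Dict.get?_eq_none_iff_not_mem_keys _ _).mp hn) hmem
    rcases Option.ne_none_iff_exists'.mp hne with ⟨v, hv⟩
    rw [hv]
    rw [PySem.Dict.getD_eq_get?_getD, hv] at hgd
    simp only [Option.getD_some] at hgd
    rw [hgd]

-- ---- B's totals dict, characterised by get? ----

lemma pvB_inner (d : Int) (rs : List Int) : ∀ (acc : List Int) (f0 : Bool) (s0 : Int),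
    rs.foldl
      (fun (q : List Int × Bool × Int) r =>
        if r ≥ d then
          (q.1 ++ [PySem.Int.mod r d], true, q.2.2 + PySem.Int.floordiv r d)
        else (q.1 ++ [r], q.2.1, q.2.2))
      (acc, f0, s0)
    = (acc ++ rs.map (pvStep d), f0 || pvFire d rs, s0 + pvSubtotal d rs) := by
  induction rs with
  | nil => intro acc f0 s0; simp [pvFire, pvSubtotal]
  | cons r rs ih =>
    intro acc f0 s0
    by_cases h : r ≥ d
    · simp [List.foldl_cons, h, ih, pvStep, pvFire, pvSubtotal, List.append_assoc]
      ring
    · simp [List.foldl_cons, h, ih, pvStep, pvFire, pvSubtotal, List.append_assoc]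

lemma pvB_outer_cons (d : Int) (ds rs : List Int) (t : PySem.Dict Int Int) :
    ((d :: ds).foldl
      (fun (s : List Int × PySem.Dict Int Int) d =>
        let inner :=
          s.1.foldl
            (fun (q : List Int × Bool × Int) r =>
              if r ≥ d then
                (q.1 ++ [PySem.Int.mod r d], true, q.2.2 + PySem.Int.floordiv r d)
              else (q.1 ++ [r], q.2.1, q.2.2))
            ([], false, 0)
        (inner.1, if inner.2.1 then s.2.insert d inner.2.2 else s.2))
      (rs, t))
    = (ds.foldl
      (fun (s : List Int × PySem.Dict Int Int) d =>
        let inner :=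
          s.1.foldl
            (fun (q : List Int × Bool × Int) r =>
              if r ≥ d then
                (q.1 ++ [PySem.Int.mod r d], true, q.2.2 + PySem.Int.floordiv r d)
              else (q.1 ++ [r], q.2.1, q.2.2))
            ([], false, 0)
        (inner.1, if inner.2.1 then s.2.insert d inner.2.2 else s.2))
      (rs.map (pvStep d), if pvFire d rs then t.insert d (pvSubtotal d rs) else t)) := by
  rw [List.foldl_cons]
  congr 1
  dsimp only
  rw [pvB_inner]
  simp

lemma pvB_get? (ds : List Int) : ∀ (rs : List Int) (t : PySem.Dict Int Int) (k : Int),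
    ((ds.foldl
      (fun (s : List Int × PySem.Dict Int Int) d =>
        let inner :=
          s.1.foldl
            (fun (q : List Int × Bool × Int) r =>
              if r ≥ d then
                (q.1 ++ [PySem.Int.mod r d], true, q.2.2 + PySem.Int.floordiv r d)
              else (q.1 ++ [r], q.2.1, q.2.2))
            ([], false, 0)
        (inner.1, if inner.2.1 then s.2.insert d inner.2.2 else s.2))
      (rs, t)).2).get? k
    = pvOr (pvBVal rs ds k) (t.get? k) := by
  induction ds with
  | nil => intro rs t k; simp [pvBVal, pvOr]
  | cons d ds ih =>
    intro rs t k
    rw [pvB_outer_cons, ih, pvBVal]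
    rcases hl : pvBVal (rs.map (pvStep d)) ds k with _ | w
    · rw [pvOr_none, pvOr_none]
      cases hfire : pvFire d rs
      · simp [pvOr]
      · by_cases hk : k = d
        · subst hk
          simp [pvOr]
        · simp [PySem.Dict.get?_insert, hk, pvOr]
    · simp [pvOr]

lemma pvB_keys_nodup (ds : List Int) : ∀ (rs : List Int) (t : PySem.Dict Int Int),
    t.keys.Nodup →
    ((ds.foldl
      (fun (s : List Int × PySem.Dict Int Int) d =>
        let inner :=
          s.1.foldl
            (fun (q : List Int × Bool × Int) r =>
              if r ≥ d then
                (q.1 ++ [PySem.Int.mod r d], true, q.2.2 + PySem.Int.floordiv r d)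
              else (q.1 ++ [r], q.2.1, q.2.2))
            ([], false, 0)
        (inner.1, if inner.2.1 then s.2.insert d inner.2.2 else s.2))
      (rs, t)).2).keys.Nodup := by
  induction ds with
  | nil => intro rs t h; exact h
  | cons d ds ih =>
    intro rs t h
    rw [List.foldl_cons]
    refine ih _ _ ?_
    dsimp only
    split
    · exact PySem.Dict.nodup_keys_insert _ _ _ h
    · exact h

-- ---- sorted items of two nodup-key dicts with the same lookups agree ----

lemma pvSorted_items_eq (d₁ d₂ : PySem.Dict Int Int) (hnd1 : d₁.keys.Nodup)
    (hnd2 : d₂.keys.Nodup) (hg : ∀ k, d₁.get? k = d₂.get? k) :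
    PySem.List.sorted d₁.items (fun p => p.1) false =
      PySem.List.sorted d₂.items (fun p => p.1) false := by
  have hkp : d₁.keys.Perm d₂.keys := by
    refine (List.perm_ext_iff_of_nodup hnd1 hnd2).mpr ?_
    intro k
    constructor
    · intro hm
      by_contra hc
      have hn := (PySem.Dict.get?_eq_none_iff_not_mem_keys _ _).mpr hc
      rw [← hg k] at hn
      exact ((PySem.Dict.get?_eq_none_iff_not_mem_keys _ _).mp hn) hm
    · intro hm
      by_contra hc
      have hn := (PySem.Dict.get?_eq_none_iff_not_mem_keys _ _).mpr hc
      rw [hg k] at hn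
      exact ((PySem.Dict.get?_eq_none_iff_not_mem_keys _ _).mp hn) hm
  have hgd : ∀ k, d₁.getD k 0 = d₂.getD k 0 := by
    intro k
    rw [PySem.Dict.getD_eq_get?_getD, PySem.Dict.getD_eq_get?_getD, hg k]
  have hi1 := PySem.Dict.items_eq_map_keys d₁ hnd1 0
  have hi2 := PySem.Dict.items_eq_map_keys d₂ hnd2 0
  have hitems : d₁.items.Perm d₂.items := by
    rw [hi1, hi2]
    have h2c : d₂.keys.map (fun k => (k, d₂.getD k 0))
        = d₂.keys.map (fun k => (k, d₁.getD k 0)) :=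
      List.map_congr_left (fun k _ => by rw [hgd k])
    rw [h2c]
    exact hkp.map _
  have hperm1 : (PySem.List.sorted d₁.items (fun p => p.1) false).Perm d₁.items :=
    PySem.List.sorted_perm _ _ _
  have hle : (PySem.List.sorted d₁.items (fun p => p.1) false).Pairwise
      (fun a b => a.1 ≤ b.1) := PySem.List.sorted_pairwise _ _
  have hndk : ((PySem.List.sorted d₁.items (fun p => p.1) false).map (fun p => p.1)).Nodup := by
    refine ((hperm1.map (fun p => p.1)).nodup_iff).mpr ?_
    have hkeq : d₁.items.map (fun p => p.1) = d₁.keys := rfl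
    rw [hkeq]; exact hnd1
  have hne : (PySem.List.sorted d₁.items (fun p => p.1) false).Pairwise
      (fun a b => a.1 ≠ b.1) := by
    rw [List.Nodup, List.pairwise_map] at hndk; exact hndk
  have hlt := (hle.and hne).imp (fun h => lt_of_le_of_ne h.1 h.2)
  have hfinal : PySem.List.sorted d₂.items (fun p => p.1) false
      = PySem.List.sorted d₁.items (fun p => p.1) false :=
    PySem.List.sorted_eq_of_perm_of_pairwise_lt _ _ (fun p => p.1) (hperm1.trans hitems) hlt
  exact hfinal.symm

-- ===== VERDICT (by name: the statement is the Claim_ definition above) =====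
theorem summarize_bill_counts_spec : Claim_equal_summarize_bill_counts := by
  intro req den _ hPre
  unfold Spec_summarize_bill_counts
  have h : PySem.List.sorted
      ((req.map (fun amount => calculate_bill_counts amount den)).foldl
        (fun total calculation =>
          calculation.items.foldl
            (fun total p =>
              if total.contains p.1 then total.modify p.1 0 (· + p.2) else total.insert p.1 p.2)
            total)
        PySem.Dict.empty).items (fun p => p.1) false
      = PySem.List.sorted
      ((den.foldl
        (fun (s : List Int × PySem.Dict Int Int) d =>
          let inner :=
            s.1.foldl
              (fun (q : List Int × Bool × Int) r =>
                if r ≥ d then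
                  (q.1 ++ [PySem.Int.mod r d], true, q.2.2 + PySem.Int.floordiv r d)
                else (q.1 ++ [r], q.2.1, q.2.2))
              ([], false, 0)
          (inner.1, if inner.2.1 then s.2.insert d inner.2.2 else s.2))
        (req, PySem.Dict.empty)).2).items (fun p => p.1) false := by
    rw [pvTotalA_eq req den]
    refine pvSorted_items_eq _ _ (pvCFold_keys_nodup _)
      (pvB_keys_nodup den req PySem.Dict.empty (by simp)) ?_
    intro k
    rw [pvTotalA_get?, pvB_get?]
    have hBe : pvOr (pvBVal req den k) (PySem.Dict.empty.get? k) = pvBVal req den k := by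
      cases pvBVal req den k <;> simp [pvOr, PySem.Dict.get?_empty]
    rw [hBe]
    by_cases hall : ∀ t ∈ req, pvVal t den k = none
    · rw [if_pos hall, (pvBVal_none_iff den req k).mpr hall]
    · rw [if_neg hall]
      have hne : pvBVal req den k ≠ none := fun hn => hall ((pvBVal_none_iff den req k).mp hn)
      rcases Option.ne_none_iff_exists'.mp hne with ⟨v, hv⟩
      rw [hv, pvBVal_some_val den req k v hPre hv]
  calc summarize_bill_counts req den
      = ["Requested bill amounts: [" ++ PySem.Str.join ", " (req.map PySem.Int.toStr) ++ "]",
         "Total requested amount: " ++ PySem.Int.toStr req.sum,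
         PySem.Str.join " | "
           ((PySem.List.sorted
              ((req.map (fun amount => calculate_bill_counts amount den)).foldl
                (fun total calculation =>
                  calculation.items.foldl
                    (fun total p =>
                      if total.contains p.1 then total.modify p.1 0 (· + p.2)
                      else total.insert p.1 p.2)
                    total)
                PySem.Dict.empty).items (fun p => p.1) false).map
             (fun p => pvFormatBillCount p.1 p.2))] := rfl
    _ = ["Requested bill amounts: [" ++ PySem.Str.join ", " (req.map PySem.Int.toStr) ++ "]",
         "Total requested amount: " ++ PySem.Int.toStr req.sum,
         PySem.Str.join " | "
           ((PySem.List.sorted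
              ((den.foldl
                (fun (s : List Int × PySem.Dict Int Int) d =>
                  let inner :=
                    s.1.foldl
                      (fun (q : List Int × Bool × Int) r =>
                        if r ≥ d then
                          (q.1 ++ [PySem.Int.mod r d], true, q.2.2 + PySem.Int.floordiv r d)
                        else (q.1 ++ [r], q.2.1, q.2.2))
                      ([], false, 0)
                  (inner.1, if inner.2.1 then s.2.insert d inner.2.2 else s.2))
                (req, PySem.Dict.empty)).2).items (fun p => p.1) false).map
             (fun p => pvFormatBillCount p.1 p.2))] := by rw [h]
    _ = summarize_bill_counts_alt req den := rfl
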